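-- pv_equiv track=rewrite | github.com/montanizstills/Crypto-Algorithms | DES.py | replace_parity_bits
-- ===== SOURCE A (Python) =====
-- def replace_parity_bits(binary_str: str, replacement:str):
--     str_op_removal = ""
--     for pos, bit in enumerate(binary_str):
--         if (pos + 1) % 8 == 0:  # PEMDAS modulus
--             str_op_removal += replacement
--         else:
--             str_op_removal += bit
--     return str_op_removal
-- ===== SOURCE B (Python) =====
-- def replace_parity_bits(binary_str: str, replacement: str):
--     pieces = []
--     for i in range(0, len(binary_str), 8):
--         chunk = binary_str[i:i + 8]
--         if len(chunk) == 8: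
--             pieces.append(chunk[:7] + replacement)
--         else:
--             pieces.append(chunk)
--     return "".join(pieces)
-- ===== Notes on version B (the rewrite author's own statement) =====
-- stated objective: alternative
-- what changed: B processes the string in 8-character chunks, rebuilding each full chunk as its first 7 characters plus the replacement and keeping a trailing partial chunk verbatim, instead of A's per-character scan with a modulo test and repeated string concatenation.
import Mathlib
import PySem

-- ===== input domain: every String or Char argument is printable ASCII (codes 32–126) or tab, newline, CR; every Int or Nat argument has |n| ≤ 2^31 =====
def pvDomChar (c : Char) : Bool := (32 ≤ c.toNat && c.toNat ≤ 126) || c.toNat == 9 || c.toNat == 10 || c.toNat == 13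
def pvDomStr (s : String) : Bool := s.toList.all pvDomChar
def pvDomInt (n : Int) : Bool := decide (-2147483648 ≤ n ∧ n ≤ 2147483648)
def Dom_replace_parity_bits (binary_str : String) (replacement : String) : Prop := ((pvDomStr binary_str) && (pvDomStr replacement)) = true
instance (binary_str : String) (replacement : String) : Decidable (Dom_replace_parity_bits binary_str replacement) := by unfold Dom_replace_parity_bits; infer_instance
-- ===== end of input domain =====

-- B replaces A's per-character modulo scan with an 8-character chunk decomposition; alternative structure, same result.

-- ===== PORT A =====
-- A: for pos, bit in enumerate(binary_str): append replacement if (pos+1)%8==0 else bit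
def replace_parity_bits (binary_str : String) (replacement : String) : String :=
  String.ofList ((PySem.List.enumerate binary_str.toList).foldl
    (fun acc p => if (p.1 + 1) % 8 == 0 then acc ++ replacement.toList else acc ++ [p.2]) [])

-- ===== PORT B =====
-- B: walk the character list in chunks of 8; a full chunk becomes its first 7 chars + replacement,
-- a trailing partial chunk is kept verbatim.
def rpbChunks (r : List Char) : List Char → List Char
  | c0 :: c1 :: c2 :: c3 :: c4 :: c5 :: c6 :: _ :: rest =>
      c0 :: c1 :: c2 :: c3 :: c4 :: c5 :: c6 :: (r ++ rpbChunks r rest)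
  | rest => rest

def replace_parity_bits_alt (binary_str : String) (replacement : String) : String :=
  String.ofList (rpbChunks replacement.toList binary_str.toList)

-- ===== PRECONDITION & SPEC =====
def Spec_replace_parity_bits (binary_str : String) (replacement : String) (out : String) : Prop := out = replace_parity_bits_alt binary_str replacement
instance (binary_str : String) (replacement : String) (out : String) : Decidable (Spec_replace_parity_bits binary_str replacement out) := by unfold Spec_replace_parity_bits; infer_instance

-- ===== CLAIM (what is proved, stated in full; the proofs are below) =====
def Claim_equal_replace_parity_bits : Prop := ∀ (binary_str : String) (replacement : String), Dom_replace_parity_bits binary_str replacement → Spec_replace_parity_bits binary_str replacement (replace_parity_bits binary_str replacement)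

-- ===== LEMMAS AND PROOFS =====

theorem rpb_foldl_enum (r : List Char) :
    ∀ (l : List Char) (pos : Int) (acc : List Char), pos % 8 = 0 →
      (PySem.List.enumerate l pos).foldl
        (fun acc p => if (p.1 + 1) % 8 == 0 then acc ++ r else acc ++ [p.2]) acc
      = acc ++ rpbChunks r l := by
  intro l
  induction l using rpbChunks.induct with
  | case1 c0 c1 c2 c3 c4 c5 c6 c7 rest ih =>
      intro pos acc hpos
      simp only [PySem.List.enumerate_cons, List.foldl_cons, beq_iff_eq]
      have h1 : (pos + 1) % 8 ≠ 0 := by omega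
      have h2 : (pos + 1 + 1) % 8 ≠ 0 := by omega
      have h3 : (pos + 1 + 1 + 1) % 8 ≠ 0 := by omega
      have h4 : (pos + 1 + 1 + 1 + 1) % 8 ≠ 0 := by omega
      have h5 : (pos + 1 + 1 + 1 + 1 + 1) % 8 ≠ 0 := by omega
      have h6 : (pos + 1 + 1 + 1 + 1 + 1 + 1) % 8 ≠ 0 := by omega
      have h7 : (pos + 1 + 1 + 1 + 1 + 1 + 1 + 1) % 8 ≠ 0 := by omega
      have h8 : (pos + 1 + 1 + 1 + 1 + 1 + 1 + 1 + 1) % 8 = 0 := by omega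
      rw [if_neg h1, if_neg h2, if_neg h3, if_neg h4, if_neg h5, if_neg h6, if_neg h7, if_pos h8]
      have ih' := ih (pos + 1 + 1 + 1 + 1 + 1 + 1 + 1 + 1) (acc ++ [c0] ++ [c1] ++ [c2] ++ [c3] ++ [c4] ++ [c5] ++ [c6] ++ r) h8
      simp only [beq_iff_eq] at ih'
      rw [ih']
      simp [rpbChunks]
  | case2 rest h =>
      intro pos acc hpos
      match rest, h with
      | c0 :: c1 :: c2 :: c3 :: c4 :: c5 :: c6 :: c7 :: rest', hh =>
          exact (hh c0 c1 c2 c3 c4 c5 c6 c7 rest' rfl).elim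
      | [], _ =>
          simp [PySem.List.enumerate_nil, rpbChunks]
      | [a], _ =>
          have h1 : ¬ ((8:Int) ∣ (pos + 1)) := by omega
          simp [PySem.List.enumerate_cons, PySem.List.enumerate_nil, rpbChunks, h1]
      | [a, b], _ =>
          have h1 : ¬ ((8:Int) ∣ (pos + 1)) := by omega
          have h2 : ¬ ((8:Int) ∣ (pos + 1 + 1)) := by omega
          simp [PySem.List.enumerate_cons, PySem.List.enumerate_nil, rpbChunks, h1, h2]
      | [a, b, c], _ =>
          have h1 : ¬ ((8:Int) ∣ (pos + 1)) := by omega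
          have h2 : ¬ ((8:Int) ∣ (pos + 1 + 1)) := by omega
          have h3 : ¬ ((8:Int) ∣ (pos + 1 + 1 + 1)) := by omega
          simp [PySem.List.enumerate_cons, PySem.List.enumerate_nil, rpbChunks, h1, h2, h3]
      | [a, b, c, d], _ =>
          have h1 : ¬ ((8:Int) ∣ (pos + 1)) := by omega
          have h2 : ¬ ((8:Int) ∣ (pos + 1 + 1)) := by omega
          have h3 : ¬ ((8:Int) ∣ (pos + 1 + 1 + 1)) := by omega
          have h4 : ¬ ((8:Int) ∣ (pos + 1 + 1 + 1 + 1)) := by omega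
          simp [PySem.List.enumerate_cons, PySem.List.enumerate_nil, rpbChunks, h1, h2, h3, h4]
      | [a, b, c, d, e], _ =>
          have h1 : ¬ ((8:Int) ∣ (pos + 1)) := by omega
          have h2 : ¬ ((8:Int) ∣ (pos + 1 + 1)) := by omega
          have h3 : ¬ ((8:Int) ∣ (pos + 1 + 1 + 1)) := by omega
          have h4 : ¬ ((8:Int) ∣ (pos + 1 + 1 + 1 + 1)) := by omega
          have h5 : ¬ ((8:Int) ∣ (pos + 1 + 1 + 1 + 1 + 1)) := by omega
          simp [PySem.List.enumerate_cons, PySem.List.enumerate_nil, rpbChunks, h1, h2, h3, h4, h5]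
      | [a, b, c, d, e, f], _ =>
          have h1 : ¬ ((8:Int) ∣ (pos + 1)) := by omega
          have h2 : ¬ ((8:Int) ∣ (pos + 1 + 1)) := by omega
          have h3 : ¬ ((8:Int) ∣ (pos + 1 + 1 + 1)) := by omega
          have h4 : ¬ ((8:Int) ∣ (pos + 1 + 1 + 1 + 1)) := by omega
          have h5 : ¬ ((8:Int) ∣ (pos + 1 + 1 + 1 + 1 + 1)) := by omega
          have h6 : ¬ ((8:Int) ∣ (pos + 1 + 1 + 1 + 1 + 1 + 1)) := by omega
          simp [PySem.List.enumerate_cons, PySem.List.enumerate_nil, rpbChunks, h1, h2, h3, h4, h5, h6]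
      | [a, b, c, d, e, f, g], _ =>
          have h1 : ¬ ((8:Int) ∣ (pos + 1)) := by omega
          have h2 : ¬ ((8:Int) ∣ (pos + 1 + 1)) := by omega
          have h3 : ¬ ((8:Int) ∣ (pos + 1 + 1 + 1)) := by omega
          have h4 : ¬ ((8:Int) ∣ (pos + 1 + 1 + 1 + 1)) := by omega
          have h5 : ¬ ((8:Int) ∣ (pos + 1 + 1 + 1 + 1 + 1)) := by omega
          have h6 : ¬ ((8:Int) ∣ (pos + 1 + 1 + 1 + 1 + 1 + 1)) := by omega
          have h7 : ¬ ((8:Int) ∣ (pos + 1 + 1 + 1 + 1 + 1 + 1 + 1)) := by omega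
          simp [PySem.List.enumerate_cons, PySem.List.enumerate_nil, rpbChunks, h1, h2, h3, h4, h5, h6, h7]

-- ===== VERDICT (by name: the statement is the Claim_ definition above) =====
theorem replace_parity_bits_spec : Claim_equal_replace_parity_bits := by
  intro s r _
  unfold Spec_replace_parity_bits replace_parity_bits replace_parity_bits_alt
  rw [rpb_foldl_enum r.toList s.toList 0 [] (by omega)]
  simp
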